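-- pv_equiv track=rewrite | github.com/eshanuniyal/project-euler | project-euler-python/problem_73.py | pFactors
-- ===== SOURCE A (Python) =====
-- def pFactors(limit, primes):
--     # generates dictionary of all unique prime factors of all numbers up to input number given list of primes
--     pFactors = {}
--     for i in range(2, limit + 1):
--         pFactors[i] = []
--
--     for prime in primes:
--         maxMult = (limit + 1) // prime
--         while maxMult * prime > limit:
--             maxMult -= 1
--         for mult in range(1, maxMult + 1):
--             pFactors[prime * mult].append(prime)
--     return(pFactors)
-- ===== SOURCE B (Python) =====
-- def pFactors(limit, primes):
--     # number-outer dict comprehension: each n keeps the primes dividing it, in order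
--     return {i: [p for p in primes if i % p == 0] for i in range(2, limit + 1)}
-- ===== Notes on version B (the rewrite author's own statement) =====
-- stated objective: idiomatic
-- what changed: Replaces the prime-outer sieve (pre-initialized empty lists, then appending each prime to all of its multiples, with a decrement loop for the multiple bound) by a number-outer dict comprehension that builds each entry directly by filtering the primes list for divisors of i.
import Mathlib
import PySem

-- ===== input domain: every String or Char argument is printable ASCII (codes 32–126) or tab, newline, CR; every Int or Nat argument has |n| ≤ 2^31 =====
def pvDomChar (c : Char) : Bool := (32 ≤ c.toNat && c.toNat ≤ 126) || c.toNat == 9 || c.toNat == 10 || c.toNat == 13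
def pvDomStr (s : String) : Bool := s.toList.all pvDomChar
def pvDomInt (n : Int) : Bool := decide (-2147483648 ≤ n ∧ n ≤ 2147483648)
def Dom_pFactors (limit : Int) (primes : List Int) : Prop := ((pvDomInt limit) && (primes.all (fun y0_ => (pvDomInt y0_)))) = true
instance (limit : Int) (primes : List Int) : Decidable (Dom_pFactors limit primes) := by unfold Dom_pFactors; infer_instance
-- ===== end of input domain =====

-- B replaces A's prime-outer sieve by a number-outer dict comprehension filtering the
-- primes that divide each number (idiomatic rewrite; same exact result).

-- ===== PORT A =====

-- 'while maxMult * prime > limit: maxMult -= 1'; the '0 < prime' guard only makes the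
-- recursion total (for prime ≤ 0 the Python loop raises or diverges; excluded by Pre_).
def pvWhile (limit prime m : Int) : Int :=
  if h : 0 < prime ∧ limit < m * prime then pvWhile limit prime (m - 1) else m
termination_by (m * prime - limit).toNat
decreasing_by
  have hp : (m - 1) * prime = m * prime - prime := by ring
  omega

def pFactors (limit : Int) (primes : List Int) : List (Int × List Int) :=
  let init : PySem.Dict Int (List Int) :=
    (PySem.List.pyRange 2 (limit + 1) 1).foldl
      (fun d i => d.insert i ([] : List Int)) PySem.Dict.empty
  let final : PySem.Dict Int (List Int) :=
    primes.foldl (fun d prime =>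
      let maxMult := pvWhile limit prime (PySem.Int.floordiv (limit + 1) prime)
      (PySem.List.pyRange 1 (maxMult + 1) 1).foldl
        (fun d mult => d.modify (prime * mult) [] (fun v => v ++ [prime])) d) init
  final.items

-- ===== PORT B =====
def pFactors_alt (limit : Int) (primes : List Int) : List (Int × List Int) :=
  ((PySem.List.pyRange 2 (limit + 1) 1).foldl
    (fun d i => d.insert i (primes.filter (fun p => PySem.Int.mod i p == 0)))
    (PySem.Dict.empty : PySem.Dict Int (List Int))).items

-- ===== PRECONDITION & SPEC =====
-- Pre_ excludes exactly the inputs on which the Python A does not return: a prime ≤ 0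
-- raises ZeroDivisionError (prime = 0) or loops forever (prime < 0), and prime = 1 with
-- limit ≥ 1 raises KeyError at key 1 (with limit ≤ 0 its multiple range is empty and A returns).
def Pre_pFactors (limit : Int) (primes : List Int) : Prop :=
  ∀ p ∈ primes, 2 ≤ p ∨ (p = 1 ∧ limit ≤ 0)
instance (limit : Int) (primes : List Int) : Decidable (Pre_pFactors limit primes) := by
  unfold Pre_pFactors; infer_instance

def pvWitness_pFactors : Int × List Int := (10, [2, 3, 5, 7])

def Spec_pFactors (limit : Int) (primes : List Int) (out : List (Int × List Int)) : Prop := out = pFactors_alt limit primes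
instance (limit : Int) (primes : List Int) (out : List (Int × List Int)) : Decidable (Spec_pFactors limit primes out) := by unfold Spec_pFactors; infer_instance

-- ===== CLAIM (what is proved, stated in full; the proofs are below) =====
def Claim_equal_pFactors : Prop := ∀ (limit : Int) (primes : List Int), Dom_pFactors limit primes → Pre_pFactors limit primes → Spec_pFactors limit primes (pFactors limit primes)

-- ===== LEMMAS AND PROOFS =====

theorem pvWhile_eq (limit prime : Int) (hp : 0 < prime) :
    ∀ m, PySem.Int.floordiv limit prime ≤ m → pvWhile limit prime m = PySem.Int.floordiv limit prime := by
  intro m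
  have hfm : PySem.Int.floordiv limit prime * prime ≤ limit := by
    have := PySem.Int.floordiv_mul_add_mod limit prime
    have := PySem.Int.mod_nonneg limit (b := prime) hp
    omega
  induction m using pvWhile.induct (limit := limit) (prime := prime) with
  | case1 m h ih =>
    intro hm
    rw [pvWhile, dif_pos h]
    apply ih
    rcases lt_or_eq_of_le hm with h2 | h2
    · omega
    · exfalso; rw [← h2] at h; exact absurd h.2 (not_lt.mpr hfm)
  | case2 m h =>
    intro hm
    rw [pvWhile, dif_neg h]
    have h2 : m * prime ≤ limit := by
      by_contra hc
      exact h ⟨hp, by omega⟩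
    have h3 : m ≤ PySem.Int.floordiv limit prime := by
      rw [PySem.Int.le_floordiv_iff_mul_le hp]
      exact h2
    omega

theorem maxMult_eq (limit prime : Int) (hp : 0 < prime) :
    pvWhile limit prime (PySem.Int.floordiv (limit + 1) prime) = PySem.Int.floordiv limit prime := by
  apply pvWhile_eq limit prime hp
  rw [PySem.Int.floordiv_eq_ediv_of_pos hp, PySem.Int.floordiv_eq_ediv_of_pos hp]
  exact Int.ediv_le_ediv hp (by omega)

theorem set_update_of_subset (xs : List Int) : ∀ (s : PySem.Set Int), (∀ x ∈ xs, x ∈ s) → PySem.Set.update s xs = s := by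
  induction xs with
  | nil => intro s h; rfl
  | cons x t ih =>
    intro s h
    have hx : PySem.Set.add s x = s := by
      simp [PySem.Set.add, PySem.Set.contains, h x (by simp)]
    show PySem.Set.update (PySem.Set.add s x) t = s
    rw [hx]
    exact ih s (fun y hy => h y (by simp [hy]))

theorem filter_mult (limit p c : Int) (hp : 2 ≤ p) (hc : 2 ≤ c) (hcl : c ≤ limit) :
    (PySem.List.pyRange 1 (PySem.Int.floordiv limit p + 1) 1).filter
        (fun m => p * m == c)
      = if PySem.Int.mod c p == 0 then [PySem.Int.floordiv c p] else [] := by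
  have hp0 : (0:Int) < p := by omega
  by_cases hd : p ∣ c
  · obtain ⟨m0, hm0⟩ := hd
    have hm0pos : 1 ≤ m0 := by nlinarith
    have hcp : PySem.Int.floordiv c p = m0 := by
      rw [PySem.Int.floordiv_eq_iff_of_pos hp0]
      constructor <;> nlinarith
    have hmod : PySem.Int.mod c p == 0 := by
      simp [PySem.Int.mod_eq_zero_iff_dvd]; exact ⟨m0, hm0⟩
    rw [if_pos hmod, hcp]
    have hmem : m0 ∈ PySem.List.pyRange 1 (PySem.Int.floordiv limit p + 1) 1 := by
      rw [PySem.List.mem_pyRange_one]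
      constructor
      · exact hm0pos
      · have : m0 ≤ PySem.Int.floordiv limit p := by
          rw [PySem.Int.le_floordiv_iff_mul_le hp0]; nlinarith
        omega
    have hcong : (PySem.List.pyRange 1 (PySem.Int.floordiv limit p + 1) 1).filter (fun m => p * m == c)
        = (PySem.List.pyRange 1 (PySem.Int.floordiv limit p + 1) 1).filter (fun m => m == m0) := by
      apply List.filter_congr
      intro m hm
      subst hm0
      rw [Bool.eq_iff_iff]
      simp only [beq_iff_eq]
      constructor
      · intro h; exact (mul_left_cancel₀ (by omega : p ≠ 0) h)
      · intro h; rw [h]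
    rw [hcong, List.filter_beq]
    rw [List.count_eq_one_of_mem (PySem.List.nodup_pyRange_one _ _) hmem]
    rfl
  · have hmod : ¬ (PySem.Int.mod c p == 0) = true := by
      simp [PySem.Int.mod_eq_zero_iff_dvd]; exact hd
    rw [if_neg hmod]
    rw [List.filter_eq_nil_iff]
    intro m hm
    simp only [beq_iff_eq]
    intro h
    exact hd ⟨m, h.symm⟩

-- the empty-range case
theorem range_nil_of_le (a b : Int) (h : b ≤ a) : PySem.List.pyRange a b 1 = [] := by
  rw [PySem.List.pyRange_one]
  have : (b - a).toNat = 0 := by omega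
  rw [this]
  rfl

-- inner loop: one prime p ≥ 2 appends p to the value at every c it divides, keys unchanged
theorem inner_step (limit p : Int) (hp : 2 ≤ p)
    (d : PySem.Dict Int (List Int)) (hk : d.keys = PySem.List.pyRange 2 (limit + 1) 1) :
    ((PySem.List.pyRange 1 (pvWhile limit p (PySem.Int.floordiv (limit + 1) p) + 1) 1).foldl
        (fun d mult => d.modify (p * mult) [] (fun v => v ++ [p])) d).keys
      = PySem.List.pyRange 2 (limit + 1) 1
    ∧ ∀ c, 2 ≤ c → c ≤ limit →
      ((PySem.List.pyRange 1 (pvWhile limit p (PySem.Int.floordiv (limit + 1) p) + 1) 1).foldl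
          (fun d mult => d.modify (p * mult) [] (fun v => v ++ [p])) d).getD c []
        = d.getD c [] ++ (if PySem.Int.mod c p == 0 then [p] else []) := by
  have hp0 : (0:Int) < p := by omega
  rw [maxMult_eq limit p hp0]
  constructor
  · rw [PySem.Dict.keys_foldl_modify_key, hk]
    apply set_update_of_subset
    intro x hx
    simp only [List.mem_map] at hx
    obtain ⟨m, hm, rfl⟩ := hx
    rw [PySem.List.mem_pyRange_one] at hm
    rw [PySem.List.mem_pyRange_one]
    have hml : m ≤ PySem.Int.floordiv limit p := by omega
    rw [PySem.Int.le_floordiv_iff_mul_le hp0] at hml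
    constructor
    · nlinarith
    · nlinarith
  · intro c hc hcl
    have hfold : (PySem.List.pyRange 1 (PySem.Int.floordiv limit p + 1) 1).foldl
          (fun d mult => d.modify (p * mult) [] (fun v => v ++ [p])) d
        = ((PySem.List.pyRange 1 (PySem.Int.floordiv limit p + 1) 1).map (fun m => (p * m, p))).foldl
          (fun d q => d.modify q.1 [] (fun v => v ++ [q.2])) d := by
      rw [List.foldl_map]
    rw [hfold, PySem.Dict.getD_foldl_modify_append]
    congr 1
    rw [List.filter_map]
    have : ((PySem.List.pyRange 1 (PySem.Int.floordiv limit p + 1) 1).filter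
        ((fun q : Int × Int => q.1 == c) ∘ (fun m => (p * m, p))))
        = ((PySem.List.pyRange 1 (PySem.Int.floordiv limit p + 1) 1).filter (fun m => p * m == c)) := rfl
    rw [this, filter_mult limit p c hp hc hcl]
    by_cases h : PySem.Int.mod c p == 0
    · rw [if_pos h, if_pos h]; rfl
    · rw [if_neg h, if_neg h]; rfl

-- outer loop over the primes
theorem outer_loop (limit : Int) (primes : List Int)
    (hpre : Pre_pFactors limit primes) :
    ∀ d : PySem.Dict Int (List Int), d.keys = PySem.List.pyRange 2 (limit + 1) 1 →
      (primes.foldl (fun d prime =>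
          (PySem.List.pyRange 1 (pvWhile limit prime (PySem.Int.floordiv (limit + 1) prime) + 1) 1).foldl
            (fun d mult => d.modify (prime * mult) [] (fun v => v ++ [prime])) d) d).keys
        = PySem.List.pyRange 2 (limit + 1) 1
      ∧ ∀ c, 2 ≤ c → c ≤ limit →
        (primes.foldl (fun d prime =>
            (PySem.List.pyRange 1 (pvWhile limit prime (PySem.Int.floordiv (limit + 1) prime) + 1) 1).foldl
              (fun d mult => d.modify (prime * mult) [] (fun v => v ++ [prime])) d) d).getD c []
          = d.getD c [] ++ primes.filter (fun p => PySem.Int.mod c p == 0) := by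
  induction primes with
  | nil => intro d hk; exact ⟨hk, fun c _ _ => by simp⟩
  | cons p t ih =>
    intro d hk
    have hpt : Pre_pFactors limit t := fun q hq => hpre q (by simp [hq])
    rcases hpre p (by simp) with hp2 | hp1
    · have hstep := inner_step limit p hp2 d hk
      simp only [List.foldl_cons]
      have hih := ih hpt _ hstep.1
      refine ⟨hih.1, fun c hc hcl => ?_⟩
      rw [hih.2 c hc hcl, hstep.2 c hc hcl, List.filter_cons]
      by_cases h : PySem.Int.mod c p == 0
      · rw [if_pos h, if_pos h]; simp
      · rw [if_neg h, if_neg h]; simp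
    · -- p = 1, limit ≤ 0: the inner range is empty
      obtain ⟨rfl, hl⟩ := hp1
      have hmm : pvWhile limit 1 (PySem.Int.floordiv (limit + 1) 1) = limit := by
        have := maxMult_eq limit 1 (by omega)
        rw [this, PySem.Int.floordiv_eq_ediv_of_pos (by omega : (0:Int) < 1)]
        simp
      simp only [List.foldl_cons]
      rw [hmm, range_nil_of_le 1 (limit + 1) (by omega)]
      simp only [List.foldl_nil]
      have hih := ih hpt d hk
      refine ⟨hih.1, fun c hc hcl => ?_⟩
      rw [hih.2 c hc hcl, List.filter_cons]
      have h1 : ¬ (PySem.Int.mod c 1 == 0) = true → False := by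
        intro h
        apply h
        simp
      omega

theorem init_items (limit : Int) (v : Int → List Int) :
    ((PySem.List.pyRange 2 (limit + 1) 1).foldl
        (fun d i => d.insert i (v i)) (PySem.Dict.empty : PySem.Dict Int (List Int))).items
      = (PySem.List.pyRange 2 (limit + 1) 1).map (fun i => (i, v i)) := by
  have h := PySem.Dict.items_foldl_insert_fresh (l := PySem.List.pyRange 2 (limit + 1) 1)
      (k := fun i => i) (v := v) (d := (PySem.Dict.empty : PySem.Dict Int (List Int)))
      (fun a _ => PySem.Dict.contains_empty a)
      (by simpa using PySem.List.nodup_pyRange_one 2 (limit + 1))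
  simpa using h

theorem main_eq (limit : Int) (primes : List Int) (hpre : Pre_pFactors limit primes) :
    pFactors limit primes = pFactors_alt limit primes := by
  unfold pFactors pFactors_alt
  set rng := PySem.List.pyRange 2 (limit + 1) 1 with hrng
  set init := rng.foldl (fun d i => d.insert i ([] : List Int)) (PySem.Dict.empty : PySem.Dict Int (List Int)) with hinit
  have hinit_items : init.items = rng.map (fun i => (i, ([] : List Int))) := init_items limit _
  have hinit_keys : init.keys = rng := by
    show init.items.map Prod.fst = rng
    rw [hinit_items, List.map_map]
    simp [Function.comp_def]
  have hnodup : rng.Nodup := PySem.List.nodup_pyRange_one 2 (limit + 1)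
  have hout := outer_loop limit primes hpre init hinit_keys
  set final := primes.foldl (fun d prime =>
      (PySem.List.pyRange 1 (pvWhile limit prime (PySem.Int.floordiv (limit + 1) prime) + 1) 1).foldl
        (fun d mult => d.modify (prime * mult) [] (fun v => v ++ [prime])) d) init with hfinal
  have hfk : final.keys = rng := hout.1
  have hfnd : final.keys.Nodup := by rw [hfk]; exact hnodup
  rw [PySem.Dict.items_eq_map_keys final hfnd [], hfk]
  rw [init_items limit]
  apply List.map_congr_left
  intro c hc
  rw [hrng, PySem.List.mem_pyRange_one] at hc
  have hgd := hout.2 c hc.1 (by omega)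
  have hinit_gd : init.getD c [] = [] := by
    apply PySem.Dict.getD_of_mem_items
    · rw [hinit_items]
      simp only [List.mem_map]
      exact ⟨c, by rw [hrng, PySem.List.mem_pyRange_one]; exact hc, rfl⟩
    · rw [hinit_keys]; exact hnodup
  rw [hgd, hinit_gd]
  simp

-- ===== VERDICT (by name: the statement is the Claim_ definition above) =====
theorem pFactors_spec : Claim_equal_pFactors := by
  intro limit primes _ hpre
  unfold Spec_pFactors
  exact main_eq limit primes hpre
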